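-- pv_equiv track=rewrite | github.com/CMPUT291F18MP2/Mini-Project-2 | submit/phase3.py | check_null_subset
-- ===== SOURCE A (Python) =====
-- def check_null_subset(criteria):
--     one = None
--     for op, value_str in criteria:
--         if one and (op == "=" or op == ">" or op == "<") and one != value_str:
--             return True
--         if op == "=":
--             one = value_str
--     return False
-- ===== SOURCE B (Python) =====
-- def check_null_subset(criteria):
--     # Two passes: find the first "=" criterion with a truthy value (the pivot),
--     # then report whether any later comparison criterion has a different value.
--     for i, (op, v) in enumerate(criteria):
--         if op == "=" and v:
--             return any(o in ("=", ">", "<") and val != v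
--                        for o, val in criteria[i + 1:])
--     return False
-- ===== Notes on version B (the rewrite author's own statement) =====
-- stated objective: simpler
-- what changed: Replaces the stateful single loop carrying a mutable pivot variable by two phases: locate the first truthy '=' pivot, then a direct any() over the tail for a differing comparison value.
import Mathlib
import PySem

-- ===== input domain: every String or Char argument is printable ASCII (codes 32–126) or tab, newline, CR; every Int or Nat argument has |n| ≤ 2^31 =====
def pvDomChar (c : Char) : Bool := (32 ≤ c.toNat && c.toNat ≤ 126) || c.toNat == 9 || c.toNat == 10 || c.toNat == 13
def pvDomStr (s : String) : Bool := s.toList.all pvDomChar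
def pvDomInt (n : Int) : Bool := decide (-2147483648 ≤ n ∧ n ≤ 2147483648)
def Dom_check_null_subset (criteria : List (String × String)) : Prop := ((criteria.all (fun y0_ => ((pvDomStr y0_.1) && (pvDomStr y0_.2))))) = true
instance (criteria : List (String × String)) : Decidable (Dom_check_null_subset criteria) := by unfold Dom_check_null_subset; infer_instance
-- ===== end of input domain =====

-- B: two phases (find first truthy '=' pivot, then any() over the tail) instead of one stateful loop; objective: simpler.
-- ===== PORT A =====
def pyTruthy : Option String → Bool
  | none => false
  | some s => s ≠ ""

def check_null_subset_go (one : Option String) : List (String × String) → Bool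
  | [] => false
  | (op, v) :: rest =>
    if pyTruthy one && (op = "=" || op = ">" || op = "<") && !(one == some v) then true
    else check_null_subset_go (if op = "=" then some v else one) rest

def check_null_subset (criteria : List (String × String)) : Bool :=
  check_null_subset_go none criteria

-- ===== PORT B =====
-- first pass of Source B: first "=" criterion with non-empty value; returns (pivot, tail after it)
def findPivot : List (String × String) → Option (String × List (String × String))
  | [] => none
  | (op, v) :: rest => if op = "=" && v ≠ "" then some (v, rest) else findPivot rest

def check_null_subset_alt (criteria : List (String × String)) : Bool :=
  match findPivot criteria with
  | none => false
  | some (p, rest) => rest.any (fun ov => (ov.1 = "=" || ov.1 = ">" || ov.1 = "<") && ov.2 ≠ p)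

-- ===== PRECONDITION & SPEC =====
def Spec_check_null_subset (criteria : List (String × String)) (out : Bool) : Prop := out = check_null_subset_alt criteria
instance (criteria : List (String × String)) (out : Bool) : Decidable (Spec_check_null_subset criteria out) := by unfold Spec_check_null_subset; infer_instance

-- ===== CLAIM (what is proved, stated in full; the proofs are below) =====
def Claim_equal_check_null_subset : Prop := ∀ (criteria : List (String × String)), Dom_check_null_subset criteria → Spec_check_null_subset criteria (check_null_subset criteria)

-- ===== LEMMAS AND PROOFS =====

-- ===== VERDICT (by name: the statement is the Claim_ definition above) =====
lemma go_pivot (s : String) (hs : s ≠ "") :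
    ∀ rest : List (String × String),
      check_null_subset_go (some s) rest
        = rest.any (fun ov => (ov.1 = "=" || ov.1 = ">" || ov.1 = "<") && ov.2 ≠ s) := by
  intro rest
  induction rest with
  | nil => rfl
  | cons hd tl ih =>
    obtain ⟨op, v⟩ := hd
    simp only [check_null_subset_go, List.any_cons, pyTruthy]
    by_cases hop : op = "="
    · subst hop
      by_cases hv : v = s
      · subst hv
        simp [hs, ih]
      · simp [hs, Ne.symm hv, hv]
    · by_cases hgt : op = ">"
      · subst hgt
        by_cases hv : v = s
        · subst hv; simp [hs, ih]
        · simp [hs, Ne.symm hv, hv]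
      · by_cases hlt : op = "<"
        · subst hlt
          by_cases hv : v = s
          · subst hv; simp [hs, ih]
          · simp [hs, Ne.symm hv, hv]
        · simp [hs, hop, hgt, hlt, ih]

lemma go_falsy :
    ∀ (criteria : List (String × String)) (one : Option String),
      (one = none ∨ one = some "") →
      check_null_subset_go one criteria = check_null_subset_alt criteria := by
  intro criteria
  induction criteria with
  | nil =>
    intro one h
    rcases h with h | h <;> subst h <;> rfl
  | cons hd tl ih =>
    intro one h
    obtain ⟨op, v⟩ := hd
    have htr : pyTruthy one = false := by
      rcases h with h | h <;> subst h <;> rfl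
    by_cases hop : op = "="
    · subst hop
      by_cases hv : v = ""
      · subst hv
        simp only [check_null_subset_go, htr, Bool.false_and, Bool.false_eq_true,
          if_false, if_true]
        rw [ih (some "") (Or.inr rfl)]
        simp [check_null_subset_alt, findPivot]
      · simp only [check_null_subset_go, htr, Bool.false_and, Bool.false_eq_true,
          if_false, if_true]
        rw [go_pivot v hv tl]
        simp [check_null_subset_alt, findPivot, hv]
    · simp only [check_null_subset_go, htr, Bool.false_and, Bool.false_eq_true,
        if_false, if_neg hop]
      rw [ih one h]
      simp [check_null_subset_alt, findPivot, hop]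

theorem check_null_subset_spec : Claim_equal_check_null_subset := by
  intro criteria _
  unfold Spec_check_null_subset check_null_subset
  exact go_falsy criteria none (Or.inl rfl)
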